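-- pv_equiv track=rewrite | github.com/mhtmtuna/restaurant-recommendation-project | src/build_features.py | count_directional
-- ===== SOURCE A (Python) =====
-- NEGATION_WINDOW = 4
--
-- def is_negated(text, keyword_start, negation_prefixes):
--     """Check if a keyword at keyword_start is preceded by a negation prefix."""
--     start = max(0, keyword_start - NEGATION_WINDOW)
--     prefix = text[start:keyword_start]
--     return any(neg in prefix for neg in negation_prefixes)
--
-- def count_directional(text, high_words, low_words, negation_prefixes):
--     """Count effective high and low signals in a single review.
--
--     Same negation logic as count_sentiment:
--     - A high keyword preceded by a negation counts as low.
--     - A low keyword preceded by a negation counts as high.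
--     """
--     text = str(text)
--     raw_high = False
--     negated_high = False
--     raw_low = False
--     negated_low = False
--
--     for word in high_words:
--         idx = text.find(word)
--         if idx >= 0:
--             if is_negated(text, idx, negation_prefixes):
--                 negated_high = True
--             else:
--                 raw_high = True
--
--     for word in low_words:
--         idx = text.find(word)
--         if idx >= 0:
--             if is_negated(text, idx, negation_prefixes):
--                 negated_low = True
--             else:
--                 raw_low = True
--
--     effective_high = raw_high or negated_low
--     effective_low = raw_low or negated_high
--     return effective_high, effective_low
-- ===== SOURCE B (Python) =====
-- NEGATION_WINDOW = 4
--
-- def count_directional(text, high_words, low_words, negation_prefixes):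
--     """Single left-to-right sweep over the text: record for each distinct keyword
--     the negation flag at its first occurrence, then answer both directions by
--     dictionary lookups."""
--     text = str(text)
--     n = len(text)
--     words = list(dict.fromkeys(high_words + low_words))
--     first = {}
--     for p in range(n + 1):
--         for w in words:
--             if w not in first and text[p:p + len(w)] == w:
--                 window = text[max(0, p - NEGATION_WINDOW):p]
--                 first[w] = any(neg in window for neg in negation_prefixes)
--     effective_high = any(first.get(w) is False for w in high_words) or any(first.get(w) is True for w in low_words)
--     effective_low = any(first.get(w) is False for w in low_words) or any(first.get(w) is True for w in high_words)
--     return effective_high, effective_low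
-- ===== Notes on version B (the rewrite author's own statement) =====
-- stated objective: alternative
-- what changed: Instead of running a separate text.find scan for every keyword with per-hit window re-checks, B makes one left-to-right sweep over the text positions, records each distinct keyword's first occurrence and its negation flag in a dictionary, and answers both directions by pure lookups.
import Mathlib
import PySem

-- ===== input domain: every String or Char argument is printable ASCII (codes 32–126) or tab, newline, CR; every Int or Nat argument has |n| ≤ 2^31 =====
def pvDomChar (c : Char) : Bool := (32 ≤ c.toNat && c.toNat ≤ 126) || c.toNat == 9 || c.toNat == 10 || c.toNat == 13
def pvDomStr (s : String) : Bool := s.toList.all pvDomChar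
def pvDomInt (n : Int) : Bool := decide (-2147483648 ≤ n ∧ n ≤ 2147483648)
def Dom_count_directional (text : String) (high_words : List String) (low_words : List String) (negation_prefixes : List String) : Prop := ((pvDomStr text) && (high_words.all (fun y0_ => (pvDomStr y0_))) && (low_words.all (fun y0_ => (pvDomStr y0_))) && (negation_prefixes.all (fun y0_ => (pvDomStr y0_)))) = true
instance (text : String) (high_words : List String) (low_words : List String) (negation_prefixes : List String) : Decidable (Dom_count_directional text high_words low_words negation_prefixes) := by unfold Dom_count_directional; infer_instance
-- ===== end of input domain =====

-- B replaces A's per-keyword text.find scans by one left-to-right sweep recording each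
-- distinct keyword's first occurrence and negation flag in a dict (objective: alternative).

-- ===== PORT A =====
-- is_negated(text, keyword_start, negation_prefixes)
def is_negated (text : String) (keyword_start : Int) (negation_prefixes : List String) : Bool :=
  let start := max 0 (keyword_start - 4)          -- NEGATION_WINDOW = 4
  let pfx := PySem.Str.slice text (some start) (some keyword_start)
  negation_prefixes.any (fun neg => PySem.Str.isIn neg pfx)

def count_directional (text : String) (high_words : List String) (low_words : List String) (negation_prefixes : List String) : Bool × Bool :=
  -- state = (raw_high, negated_high) over the first loop, (raw_low, negated_low) over the second
  let st1 := high_words.foldl (fun (st : Bool × Bool) word =>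
      let idx := PySem.Str.find text word
      if 0 ≤ idx then
        if is_negated text idx negation_prefixes then (st.1, true) else (true, st.2)
      else st) (false, false)
  let st2 := low_words.foldl (fun (st : Bool × Bool) word =>
      let idx := PySem.Str.find text word
      if 0 ≤ idx then
        if is_negated text idx negation_prefixes then (st.1, true) else (true, st.2)
      else st) (false, false)
  (st1.1 || st2.2, st2.1 || st1.2)

-- ===== PORT B =====
-- any(neg in text[max(0, p - NEGATION_WINDOW):p] for neg in negation_prefixes)
def bWindowNegated (text : String) (p : Int) (negation_prefixes : List String) : Bool :=
  negation_prefixes.any (fun neg =>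
    PySem.Str.isIn neg (PySem.Str.slice text (some (max 0 (p - 4))) (some p)))

-- the sweep: for p in range(len(text)+1): for w in words: if w not in first and text[p:p+len(w)] == w: first[w] = …
def bFirst (text : String) (words : List String) (negation_prefixes : List String) : PySem.Dict String Bool :=
  (PySem.List.pyRange 0 (PySem.Str.len text + 1)).foldl
    (fun d p => words.foldl
      (fun d w =>
        if !d.contains w && (PySem.Str.slice text (some p) (some (p + PySem.Str.len w)) == w)
        then d.insert w (bWindowNegated text p negation_prefixes) else d) d)
    PySem.Dict.empty

def count_directional_alt (text : String) (high_words : List String) (low_words : List String) (negation_prefixes : List String) : Bool × Bool :=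
  let words := PySem.List.dedup (high_words ++ low_words)    -- list(dict.fromkeys(...))
  let first := bFirst text words negation_prefixes
  let effective_high := (high_words.any (fun w => first.get? w == some false)) ||
                        (low_words.any (fun w => first.get? w == some true))
  let effective_low  := (low_words.any (fun w => first.get? w == some false)) ||
                        (high_words.any (fun w => first.get? w == some true))
  (effective_high, effective_low)

-- ===== PRECONDITION & SPEC =====
def Spec_count_directional (text : String) (high_words : List String) (low_words : List String) (negation_prefixes : List String) (out : Bool × Bool) : Prop := out = count_directional_alt text high_words low_words negation_prefixes
instance (text : String) (high_words : List String) (low_words : List String) (negation_prefixes : List String) (out : Bool × Bool) : Decidable (Spec_count_directional text high_words low_words negation_prefixes out) := by unfold Spec_count_directional; infer_instance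

-- ===== CLAIM (what is proved, stated in full; the proofs are below) =====
def Claim_equal_count_directional : Prop := ∀ (text : String) (high_words : List String) (low_words : List String) (negation_prefixes : List String), Dom_count_directional text high_words low_words negation_prefixes → Spec_count_directional text high_words low_words negation_prefixes (count_directional text high_words low_words negation_prefixes)

-- ===== LEMMAS AND PROOFS =====

-- the inner loop over the (nodup) word list, as a dict transformer
lemma inner_fold_get? (q v : String → Bool) :
    ∀ (l : List String), l.Nodup → ∀ (d : PySem.Dict String Bool) (u : String),
    (l.foldl (fun d w => if !d.contains w && q w then d.insert w (v w) else d) d).get? u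
      = if u ∈ l ∧ d.get? u = none ∧ q u = true then some (v u) else d.get? u := by
  intro l
  induction l with
  | nil => intro _ d u; simp
  | cons w t ih =>
    intro hnd d u
    have hw : w ∉ t := (List.nodup_cons.mp hnd).1
    have hndt : t.Nodup := (List.nodup_cons.mp hnd).2
    simp only [List.foldl_cons]
    rw [ih hndt]
    by_cases huw : u = w
    · subst huw
      have hnotu : u ∉ t := hw
      by_cases hc : d.contains u = false
      · have hnone : d.get? u = none := by
          have h := PySem.Dict.contains_eq_isSome_get? d u
          rw [hc] at h
          cases ho : d.get? u
          · rfl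
          · rw [ho] at h; simp at h
        by_cases hq : q u = true
        · simp [hnotu, hc, hq, PySem.Dict.get?_insert_self, hnone]
        · have hqf : q u = false := by simpa using hq
          simp [hnotu, hc, hqf]
      · have hc' : d.contains u = true := by
          cases h : d.contains u
          · exact absurd h hc
          · rfl
        have hsome : d.get? u ≠ none := by
          have h := PySem.Dict.contains_eq_isSome_get? d u
          rw [hc'] at h
          intro hn; rw [hn] at h; simp at h
        simp [hc', hnotu, hsome]
    · have step : (if !d.contains w && q w then d.insert w (v w) else d).get? u = d.get? u := by
        split
        · exact PySem.Dict.get?_insert_of_ne _ _ huw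
        · rfl
      rw [step]
      by_cases hut : u ∈ t
      · simp [hut, huw]
      · simp [hut, huw]

-- q at position m tests "text starts with u at m"
lemma q_iff_prefix (text : String) (u : String) (m : Nat) :
    ((PySem.Str.slice text (some (m : Int)) (some ((m : Int) + PySem.Str.len u)) == u) = true)
      ↔ u.toList <+: text.toList.drop m := by
  constructor
  · intro h
    have h' : PySem.Str.slice text (some (m : Int)) (some ((m : Int) + PySem.Str.len u)) = u :=
      eq_of_beq h
    have h2 : PySem.Chars.slice text.toList (some (m : Int)) (some ((m : Int) + PySem.Str.len u)) = u.toList := by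
      rw [← PySem.Str.toList_slice, h']
    rw [PySem.Chars.slice_eq_listSlice, PySem.Str.len_eq] at h2
    rw [PySem.List.slice_natCast_add] at h2
    rw [List.prefix_iff_eq_take]
    exact h2.symm
  · intro h
    have h2 : PySem.List.slice text.toList (some (m : Int)) (some ((m : Int) + (u.toList.length : Int))) = u.toList := by
      rw [PySem.List.slice_natCast_add]
      exact (List.prefix_iff_eq_take.mp h).symm
    apply beq_iff_eq.mpr
    apply String.ext
    rw [PySem.Str.toList_slice, PySem.Chars.slice_eq_listSlice, PySem.Str.len_eq]
    exact h2

-- the sweep up to position m: the dict holds exactly the words whose first occurrence is < m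
lemma outer_fold_get? (text : String) (words : List String) (negs : List String)
    (hnd : words.Nodup) (m : Nat) (u : String) :
    ((PySem.List.pyRange 0 (m : Int)).foldl
      (fun d p => words.foldl
        (fun d w =>
          if !d.contains w && (PySem.Str.slice text (some p) (some (p + PySem.Str.len w)) == w)
          then d.insert w (bWindowNegated text p negs) else d) d)
      PySem.Dict.empty).get? u
    = if u ∈ words ∧ 0 ≤ PySem.Chars.find text.toList u.toList ∧ PySem.Chars.find text.toList u.toList < (m : Int)
      then some (bWindowNegated text (PySem.Chars.find text.toList u.toList) negs) else none := by
  induction m with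
  | zero =>
    simp only [Nat.cast_zero]
    rw [PySem.List.pyRange_one_eq_nil le_rfl]
    simp only [List.foldl_nil, PySem.Dict.get?_empty]
    have hno : ¬ (u ∈ words ∧ 0 ≤ PySem.Chars.find text.toList u.toList ∧ PySem.Chars.find text.toList u.toList < 0) := by
      rintro ⟨_, h1, h2⟩; omega
    rw [if_neg hno]
  | succ m ih =>
    have hcast : ((m + 1 : Nat) : Int) = (m : Int) + 1 := by push_cast; ring
    rw [hcast, PySem.List.pyRange_one_succ_right (by positivity), List.foldl_append, List.foldl_cons, List.foldl_nil]
    rw [inner_fold_get? _ _ words hnd, ih]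
    set f := PySem.Chars.find text.toList u.toList with hf
    by_cases hu : u ∈ words
    · by_cases hpos : 0 ≤ f
      · by_cases hlt : f < (m : Int)
        · -- already recorded before m: dict entry present, guard's "not in first" fails
          have hlt1 : f < (m : Int) + 1 := by omega
          simp [hu, hpos, hlt, hlt1]
        · by_cases heq : f = (m : Int)
          · -- first occurrence is exactly at m: it is inserted now
            have hpre : u.toList <+: text.toList.drop m := by
              have h := (PySem.Chars.find_spec (s := text.toList) (sub := u.toList) hpos).1
              rwa [← hf, heq, Int.toNat_natCast] at h
            have hq2 : PySem.Str.slice text (some (m:Int)) (some ((m:Int) + PySem.Str.len u)) = u :=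
              eq_of_beq ((q_iff_prefix text u m).mpr hpre)
            simp only [hu, heq]
            simp
            simpa using hq2
          · -- first occurrence is after m: no match at m, nothing recorded yet
            have hgt : (m : Int) < f := lt_of_le_of_ne (not_lt.mp hlt) (fun h => heq h.symm)
            have hnpre : ¬ u.toList <+: text.toList.drop m := by
              have hmlt : m < f.toNat := by omega
              exact (PySem.Chars.find_spec (s := text.toList) (sub := u.toList) hpos).2 m hmlt
            have hq : (PySem.Str.slice text (some (m:Int)) (some ((m:Int) + PySem.Str.len u)) == u) = false := by
              cases h : (PySem.Str.slice text (some (m:Int)) (some ((m:Int) + PySem.Str.len u)) == u)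
              · rfl
              · exact absurd ((q_iff_prefix text u m).mp h) hnpre
            have hlt1 : ¬ f < (m : Int) + 1 := by omega
            have hq2 : PySem.Str.slice text (some (m:Int)) (some ((m:Int) + PySem.Str.len u)) ≠ u :=
              ne_of_beq_false hq
            simp [hu, hpos, hlt, hlt1]
            simpa using hq2
      · -- the word never occurs: find = -1, never matched
        have hneg : f = -1 := by
          have h := PySem.Chars.neg_one_le_find text.toList u.toList
          omega
        have hnpre : ¬ u.toList <+: text.toList.drop m := by
          intro hpre
          have hisin : PySem.Chars.isIn u.toList text.toList = true :=
            (PySem.Chars.exists_prefix_drop_iff_isIn u.toList text.toList).mp ⟨m, hpre⟩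
          have h0 : 0 ≤ f := (PySem.Chars.find_nonneg_iff text.toList u.toList).mpr
            ((PySem.Chars.isIn_iff_infix u.toList text.toList).mp hisin)
          omega
        have hq : (PySem.Str.slice text (some (m:Int)) (some ((m:Int) + PySem.Str.len u)) == u) = false := by
          cases h : (PySem.Str.slice text (some (m:Int)) (some ((m:Int) + PySem.Str.len u)) == u)
          · rfl
          · exact absurd ((q_iff_prefix text u m).mp h) hnpre
        have hq2 : PySem.Str.slice text (some (m:Int)) (some ((m:Int) + PySem.Str.len u)) ≠ u :=
          ne_of_beq_false hq
        simp [hu, hpos]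
        simpa using hq2
    · simp [hu]

-- the recorded classification of each distinct keyword
lemma bFirst_get? (text : String) (words : List String) (negs : List String)
    (hnd : words.Nodup) (u : String) (hu : u ∈ words) :
    (bFirst text words negs).get? u
    = if 0 ≤ PySem.Chars.find text.toList u.toList
      then some (bWindowNegated text (PySem.Chars.find text.toList u.toList) negs) else none := by
  unfold bFirst
  have hlen : PySem.Str.len text + 1 = ((text.toList.length + 1 : Nat) : Int) := by
    rw [PySem.Str.len_eq]; push_cast; ring
  rw [hlen, outer_fold_get? text words negs hnd (text.toList.length + 1) u]
  have hle := PySem.Chars.find_le_length text.toList u.toList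
  by_cases hpos : 0 ≤ PySem.Chars.find text.toList u.toList
  · have : PySem.Chars.find text.toList u.toList < ((text.toList.length + 1 : Nat) : Int) := by
      push_cast; omega
    have hle2 : PySem.Chars.find text.toList u.toList ≤ (text.length : Int) := by simpa using hle
    simp [hu, hpos, hle2]
  · simp [hu, hpos]

-- B's negation window is A's is_negated
lemma bWindowNegated_eq (text : String) (p : Int) (negs : List String) :
    bWindowNegated text p negs = is_negated text p negs := rfl

-- A's flag loop computes two 'any's
lemma a_loop_eq_any (text : String) (negs : List String) (l : List String) :
    l.foldl (fun (st : Bool × Bool) word =>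
      let idx := PySem.Str.find text word
      if 0 ≤ idx then
        if is_negated text idx negs then (st.1, true) else (true, st.2)
      else st) (false, false)
    = (l.any (fun w => 0 ≤ PySem.Str.find text w ∧ ¬ is_negated text (PySem.Str.find text w) negs),
       l.any (fun w => 0 ≤ PySem.Str.find text w ∧ is_negated text (PySem.Str.find text w) negs)) := by
  have hstep : (fun (st : Bool × Bool) word =>
      let idx := PySem.Str.find text word
      if 0 ≤ idx then
        if is_negated text idx negs then (st.1, true) else (true, st.2)
      else st)
    = fun (st : Bool × Bool) w =>
        ((if decide (0 ≤ PySem.Str.find text w ∧ ¬ is_negated text (PySem.Str.find text w) negs) = true then true else st.1),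
         (if decide (0 ≤ PySem.Str.find text w ∧ is_negated text (PySem.Str.find text w) negs) = true then true else st.2)) := by
    funext st w
    by_cases h1 : 0 ≤ PySem.Chars.find text.toList w.toList
    · by_cases h2 : is_negated text (PySem.Chars.find text.toList w.toList) negs
      · simp [h1, h2]
      · simp [h1, h2]
    · simp [h1]
  rw [hstep]
  rw [PySem.List.foldl_prod_mk
        (f := fun b w => if decide (0 ≤ PySem.Str.find text w ∧ ¬ is_negated text (PySem.Str.find text w) negs) = true then true else b)
        (g := fun b w => if decide (0 ≤ PySem.Str.find text w ∧ is_negated text (PySem.Str.find text w) negs) = true then true else b)]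
  rw [PySem.List.foldl_if_true_eq, PySem.List.foldl_if_true_eq]
  simp

-- B's dict lookup tests agree with A's per-word tests, on members of either list
lemma lookup_false_eq (text : String) (negs : List String) (words : List String)
    (hnd : words.Nodup) (w : String) (hw : w ∈ words) :
    ((bFirst text words negs).get? w == some false)
      = decide (0 ≤ PySem.Str.find text w ∧ ¬ is_negated text (PySem.Str.find text w) negs) := by
  rw [bFirst_get? text words negs hnd w hw]
  have hfind : PySem.Str.find text w = PySem.Chars.find text.toList w.toList := by
    simp [PySem.Str.find_eq]
  by_cases hpos : 0 ≤ PySem.Chars.find text.toList w.toList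
  · rw [if_pos hpos, bWindowNegated_eq]
    cases h : is_negated text (PySem.Chars.find text.toList w.toList) negs
    · simp [hpos, h]
    · simp [hpos, h]
  · rw [if_neg hpos]
    simp [hpos]

lemma lookup_true_eq (text : String) (negs : List String) (words : List String)
    (hnd : words.Nodup) (w : String) (hw : w ∈ words) :
    ((bFirst text words negs).get? w == some true)
      = decide (0 ≤ PySem.Str.find text w ∧ is_negated text (PySem.Str.find text w) negs) := by
  rw [bFirst_get? text words negs hnd w hw]
  have hfind : PySem.Str.find text w = PySem.Chars.find text.toList w.toList := by
    simp [PySem.Str.find_eq]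
  by_cases hpos : 0 ≤ PySem.Chars.find text.toList w.toList
  · rw [if_pos hpos, bWindowNegated_eq]
    cases h : is_negated text (PySem.Chars.find text.toList w.toList) negs
    · simp [hpos, h]
    · simp [hpos, h]
  · rw [if_neg hpos]
    simp [hpos]

-- ===== VERDICT (by name: the statement is the Claim_ definition above) =====
theorem count_directional_spec : Claim_equal_count_directional := by
  intro text high_words low_words negs _
  unfold Spec_count_directional count_directional count_directional_alt
  have hnd : (PySem.List.dedup (high_words ++ low_words)).Nodup :=
    PySem.List.nodup_dedup _
  have hhi : ∀ w ∈ high_words, w ∈ PySem.List.dedup (high_words ++ low_words) := by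
    intro w hw
    rw [PySem.List.mem_dedup]
    exact List.mem_append_left _ hw
  have hlo : ∀ w ∈ low_words, w ∈ PySem.List.dedup (high_words ++ low_words) := by
    intro w hw
    rw [PySem.List.mem_dedup]
    exact List.mem_append_right _ hw
  rw [a_loop_eq_any text negs high_words, a_loop_eq_any text negs low_words]
  have h1 : high_words.any (fun w => (bFirst text (PySem.List.dedup (high_words ++ low_words)) negs).get? w == some false)
      = high_words.any (fun w => decide (0 ≤ PySem.Str.find text w ∧ ¬ is_negated text (PySem.Str.find text w) negs)) :=
    PySem.List.any_congr_mem (fun w hw => lookup_false_eq text negs _ hnd w (hhi w hw))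
  have h2 : low_words.any (fun w => (bFirst text (PySem.List.dedup (high_words ++ low_words)) negs).get? w == some true)
      = low_words.any (fun w => decide (0 ≤ PySem.Str.find text w ∧ is_negated text (PySem.Str.find text w) negs)) :=
    PySem.List.any_congr_mem (fun w hw => lookup_true_eq text negs _ hnd w (hlo w hw))
  have h3 : low_words.any (fun w => (bFirst text (PySem.List.dedup (high_words ++ low_words)) negs).get? w == some false)
      = low_words.any (fun w => decide (0 ≤ PySem.Str.find text w ∧ ¬ is_negated text (PySem.Str.find text w) negs)) :=
    PySem.List.any_congr_mem (fun w hw => lookup_false_eq text negs _ hnd w (hlo w hw))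
  have h4 : high_words.any (fun w => (bFirst text (PySem.List.dedup (high_words ++ low_words)) negs).get? w == some true)
      = high_words.any (fun w => decide (0 ≤ PySem.Str.find text w ∧ is_negated text (PySem.Str.find text w) negs)) :=
    PySem.List.any_congr_mem (fun w hw => lookup_true_eq text negs _ hnd w (hhi w hw))
  simp only [h1, h2, h3, h4]
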